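-- pv_equiv track=rewrite | github.com/protomaps/PMTiles | python/pmtiles/pmtiles/tile.py | zxy_to_tileid
-- ===== SOURCE A (Python) =====
-- def rotate(n, x, y, rx, ry):
--     if ry == 0:
--         if rx != 0:
--             x = n - 1 - x
--             y = n - 1 - y
--         x, y = y, x
--     return x, y
--
-- def zxy_to_tileid(z, x, y):
--     if z > 31:
--         raise OverflowError("tile zoom exceeds 64-bit limit")
--     if x > (1 << z) - 1 or y > (1 << z) - 1:
--         raise ValueError("tile x/y outside zoom level bounds")
--
--     acc = ((1 << (z * 2)) - 1) // 3
--     a = z - 1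
--     while a >= 0:
--         s = 1 << a
--         rx = s & x
--         ry = s & y
--         acc += ((3 * rx) ^ ry) << a
--         (x, y) = rotate(s, x, y, rx, ry)
--         a -= 1
--     return acc
-- ===== SOURCE B (Python) =====
-- def zxy_to_tileid(z, x, y):
--     if z > 31:
--         raise OverflowError("tile zoom exceeds 64-bit limit")
--     if x > (1 << z) - 1 or y > (1 << z) - 1:
--         raise ValueError("tile x/y outside zoom level bounds")
--
--     acc = ((1 << (z * 2)) - 1) // 3
--     swap = 0
--     flip = 0
--     for a in range(z - 1, -1, -1):
--         bx = (x >> a) & 1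
--         by = (y >> a) & 1
--         u = (by if swap else bx) ^ flip
--         v = (bx if swap else by) ^ flip
--         acc += ((3 * u) ^ v) << (2 * a)
--         if v == 0:
--             flip ^= u
--             swap ^= 1
--     return acc
-- ===== Notes on version B (the rewrite author's own statement) =====
-- stated objective: alternative
-- what changed: B drops A's rotate() coordinate transformations (which rewrite x and y each iteration) and instead keeps a 2-bit orientation state (swap, flip) while reading the bits of the original x and y, composing the rotations symbolically in the state.
import Mathlib
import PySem

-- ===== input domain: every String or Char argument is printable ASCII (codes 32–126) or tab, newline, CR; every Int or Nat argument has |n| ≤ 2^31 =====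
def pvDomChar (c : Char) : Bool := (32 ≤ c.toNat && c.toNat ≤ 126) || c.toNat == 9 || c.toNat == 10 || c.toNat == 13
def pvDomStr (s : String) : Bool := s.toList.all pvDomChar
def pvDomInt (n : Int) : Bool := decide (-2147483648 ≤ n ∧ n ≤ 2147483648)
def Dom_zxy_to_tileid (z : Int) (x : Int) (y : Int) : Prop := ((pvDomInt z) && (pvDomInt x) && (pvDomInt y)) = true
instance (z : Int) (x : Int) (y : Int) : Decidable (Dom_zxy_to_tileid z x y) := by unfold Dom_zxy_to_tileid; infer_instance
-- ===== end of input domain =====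

-- B replaces A's coordinate-rotating Hilbert loop by a 2-bit orientation-state (swap/flip)
-- encoder reading the bits of the ORIGINAL x,y (objective: alternative decomposition, same O(z) cost).

-- ===== PORT A =====
-- literal port of `rotate`
def pvRotate (n : Int) (x : Int) (y : Int) (rx : Int) (ry : Int) : Int × Int :=
  if ry = 0 then
    let p := if rx ≠ 0 then (n - 1 - x, n - 1 - y) else (x, y)
    (p.2, p.1)
  else (x, y)

-- A's while-loop, counter a runs n-1 … 0 (fuel = a+1)
def pvLoopA : Nat → Int → Int → Int → Int
  | 0, _, _, acc => acc
  | a + 1, x, y, acc =>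
    let s : Int := 1 <<< (a : Int)
    let rx := Int.land s x
    let ry := Int.land s y
    let acc' := acc + (Int.xor (3 * rx) ry) <<< (a : Int)
    let p := pvRotate s x y rx ry
    pvLoopA a p.1 p.2 acc'

def zxy_to_tileid (z : Int) (x : Int) (y : Int) : Int :=
  if z > 31 then 0                                    -- Python: raise OverflowError (outside Pre_)
  else if z < 0 then 0                                -- Python: `1 << z` raises ValueError (outside Pre_)
  else if x > (1 <<< (z.toNat : Int)) - 1 ∨ y > (1 <<< (z.toNat : Int)) - 1 then 0   -- Python: raise ValueError (outside Pre_)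
  else pvLoopA z.toNat x y (((1 <<< ((z.toNat : Int) * 2)) - 1) / 3)

-- ===== PORT B =====
-- B's loop: state = (swap, flip) ∈ {0,1}², reads bit a of the original x and y
def pvLoopB : Nat → Int → Int → Int → Int → Int → Int
  | 0, _, _, _, _, acc => acc
  | a + 1, x, y, sw, fl, acc =>
    let bx := Int.land (x >>> (a : Int)) 1
    let bY := Int.land (y >>> (a : Int)) 1
    let u := Int.xor (if sw ≠ 0 then bY else bx) fl
    let v := Int.xor (if sw ≠ 0 then bx else bY) fl
    let acc' := acc + (Int.xor (3 * u) v) <<< (2 * (a : Int))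
    if v = 0 then pvLoopB a x y (Int.xor sw 1) (Int.xor fl u) acc'
    else pvLoopB a x y sw fl acc'

def zxy_to_tileid_alt (z : Int) (x : Int) (y : Int) : Int :=
  if z > 31 then 0
  else if z < 0 then 0
  else if x > (1 <<< (z.toNat : Int)) - 1 ∨ y > (1 <<< (z.toNat : Int)) - 1 then 0
  else pvLoopB z.toNat x y 0 0 (((1 <<< ((z.toNat : Int) * 2)) - 1) / 3)

-- ===== PRECONDITION & SPEC =====
-- Pre_ excludes exactly the inputs on which the Python A raises: z > 31 (OverflowError),
-- z < 0 (ValueError from a negative shift), or x/y above the zoom bound (ValueError).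
def Pre_zxy_to_tileid (z : Int) (x : Int) (y : Int) : Prop :=
  0 ≤ z ∧ z ≤ 31 ∧ x ≤ 2 ^ z.toNat - 1 ∧ y ≤ 2 ^ z.toNat - 1
instance (z : Int) (x : Int) (y : Int) : Decidable (Pre_zxy_to_tileid z x y) := by
  unfold Pre_zxy_to_tileid; infer_instance
def pvWitness_zxy_to_tileid : Int × Int × Int := (3, 5, 6)

def Spec_zxy_to_tileid (z : Int) (x : Int) (y : Int) (out : Int) : Prop := out = zxy_to_tileid_alt z x y
instance (z : Int) (x : Int) (y : Int) (out : Int) : Decidable (Spec_zxy_to_tileid z x y out) := by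
  unfold Spec_zxy_to_tileid; infer_instance

-- ===== CLAIM (what is proved, stated in full; the proofs are below) =====
def Claim_equal_zxy_to_tileid : Prop := ∀ (z : Int) (x : Int) (y : Int), Dom_zxy_to_tileid z x y → Pre_zxy_to_tileid z x y → Spec_zxy_to_tileid z x y (zxy_to_tileid z x y)

-- ===== LEMMAS AND PROOFS =====

-- integer 0/1 encoding of a bit
def pvB (b : Bool) : Int := if b then 1 else 0

-- low bits agree when residues mod 2^n agree
theorem pvNatBitLow {a n : Nat} (h : a < n) {p q : Nat} (hpq : p % 2 ^ n = q % 2 ^ n) :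
    p.testBit a = q.testBit a := by
  have hpq' : (p % 2 ^ n).testBit a = (q % 2 ^ n).testBit a := by rw [hpq]
  simpa [Nat.testBit_mod_two_pow, h] using hpq'

-- L1:  (1 << n) & t  =  if bit n of t then 2^n else 0
theorem pvLandPow (n : Nat) (t : Int) :
    Int.land (1 <<< (n : Int)) t = if t.testBit n then ((2 ^ n : Nat) : Int) else 0 := by
  rw [Int.one_shiftLeft]
  cases t with
  | ofNat m =>
    show ((2 ^ n &&& m : Nat) : Int) = _
    rw [Nat.two_pow_and]
    cases h : m.testBit n <;> simp [Int.testBit, h]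
  | negSucc m =>
    show ((Nat.ldiff (2 ^ n) m : Nat) : Int) = _
    have hld : Nat.ldiff (2 ^ n) m = if m.testBit n then 0 else 2 ^ n := by
      apply Nat.eq_of_testBit_eq
      intro i
      rcases eq_or_ne n i with rfl | hne
      · cases h : m.testBit n <;> simp [Nat.testBit_ldiff, Nat.testBit_two_pow, h]
      · cases h : m.testBit n <;>
          simp [Nat.testBit_ldiff, Nat.testBit_two_pow, h, hne]
    rw [hld]
    cases h : m.testBit n <;> simp [Int.testBit, h]

-- L2:  (t >> a) & 1  =  bit a of t as 0/1
theorem pvLandOne (a : Nat) (t : Int) :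
    Int.land (t >>> (a : Int)) 1 = pvB (t.testBit a) := by
  cases t with
  | ofNat m =>
    rw [show ((Int.ofNat m) >>> (a : Int)) = ((m >>> a : Nat) : Int) from Int.shiftRight_natCast m a]
    show (((m >>> a) &&& 1 : Nat) : Int) = _
    have h0 : (m >>> a).testBit 0 = m.testBit a := by
      rw [Nat.testBit_shiftRight, Nat.add_zero]
    have h1 : (m >>> a) &&& 1 = if m.testBit a then 1 else 0 := by
      rw [Nat.and_one_is_mod, ← h0, Nat.testBit_zero]
      rcases Nat.mod_two_eq_zero_or_one (m >>> a) with h | h <;> simp [h]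
    rw [h1]
    cases h : m.testBit a <;> simp [Int.testBit, h, pvB]
  | negSucc m =>
    rw [Int.shiftRight_negSucc]
    show ((Nat.ldiff 1 (m >>> a) : Nat) : Int) = _
    have h0 : (m >>> a).testBit 0 = m.testBit a := by
      rw [Nat.testBit_shiftRight, Nat.add_zero]
    have hld : Nat.ldiff 1 (m >>> a) = if m.testBit a then 0 else 1 := by
      apply Nat.eq_of_testBit_eq
      intro i
      rw [Nat.testBit_ldiff]
      rcases Nat.eq_zero_or_pos i with rfl | hi
      · rw [h0]
        cases h : m.testBit a <;> simp [h]
      · have h1 : (1 : Nat).testBit i = false := by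
          rw [show (1 : Nat) = 2 ^ 0 from rfl, Nat.testBit_two_pow]
          simp [Nat.pos_iff_ne_zero.mp hi, Ne.symm (Nat.pos_iff_ne_zero.mp hi)]
        cases h : m.testBit a <;> simp [h, h1]
    rw [hld]
    cases h : m.testBit a <;> simp [Int.testBit, h, pvB]

-- L3: low bits of (2^n - 1 - t) are the complemented low bits of t
theorem pvFlipBit {a n : Nat} (h : a < n) (t : Int) :
    ((1 <<< (n : Int)) - 1 - t).testBit a = !(t.testBit a) := by
  rw [Int.one_shiftLeft]
  cases t with
  | ofNat m =>
    by_cases hm : m < 2 ^ n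
    · have he : ((2 ^ n : Nat) : Int) - 1 - Int.ofNat m = Int.ofNat (2 ^ n - (m + 1)) := by
        simp only [Int.ofNat_eq_natCast]; omega
      rw [he]
      show (2 ^ n - (m + 1)).testBit a = _
      rw [Nat.testBit_two_pow_sub_succ hm]
      simp [Int.testBit, h]
    · have he : ((2 ^ n : Nat) : Int) - 1 - Int.ofNat m = Int.negSucc (m - 2 ^ n) := by
        rw [Int.negSucc_eq]; simp only [Int.ofNat_eq_natCast]; omega
      rw [he]
      simp only [Int.testBit]
      congr 1
      apply pvNatBitLow h
      conv_rhs => rw [show m = (m - 2 ^ n) + 2 ^ n by omega]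
      rw [Nat.add_mod_right]
  | negSucc m =>
    have he : ((2 ^ n : Nat) : Int) - 1 - Int.negSucc m = Int.ofNat (2 ^ n + m) := by
      rw [Int.negSucc_eq]; simp only [Int.ofNat_eq_natCast]; omega
    rw [he]
    simp only [Int.testBit]
    rw [Bool.not_not]
    exact pvNatBitLow h (by rw [Nat.add_mod_left])

-- the Hilbert digit added at a step, from the two masked values
theorem pvDigitA (n : Nat) (bX bY : Bool) :
    (Int.xor (3 * (if bX then ((2 ^ n : Nat) : Int) else 0))
        (if bY then ((2 ^ n : Nat) : Int) else 0)) <<< (n : Int)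
      = (Int.xor (3 * pvB bX) (pvB bY)) <<< (2 * (n : Int)) := by
  have hxorNat : ∀ p q : Nat, Int.xor (p : Int) (q : Int) = ((p ^^^ q : Nat) : Int) := fun _ _ => rfl
  have hshiftXor : ∀ p q k : Nat, ((p <<< k) ^^^ (q <<< k)) = (p ^^^ q) <<< k := by
    intro p q k
    apply Nat.eq_of_testBit_eq
    intro i
    by_cases h : k ≤ i <;> simp [Nat.testBit_xor, Nat.testBit_shiftLeft, h]
  have h2n : (2 * (n : Int)) = ((2 * n : Nat) : Int) := by push_cast; ring
  rw [h2n]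
  have h3 : (3 : Int) * ((2 ^ n : Nat) : Int) = ((3 * 2 ^ n : Nat) : Int) := by push_cast; ring
  cases bX <;> cases bY <;>
    simp only [pvB, Bool.false_eq_true, Bool.true_eq_false, ite_true, ite_false, if_true, if_false]
  · -- false, false
    rw [show Int.xor (3 * 0) 0 = 0 from by decide]
    rw [Int.zero_shiftLeft', Int.zero_shiftLeft']
  · -- false, true : xor 0 (2^n)
    rw [show (3 : Int) * 0 = ((0 : Nat) : Int) from rfl, hxorNat, Nat.zero_xor,
        Int.shiftLeft_eq_mul_pow, Int.shiftLeft_eq_mul_pow,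
        show Int.xor ((0 : Nat) : Int) 1 = 1 from by decide]
    push_cast
    ring
  · -- true, false : xor (3*2^n) 0
    rw [h3, show (0 : Int) = ((0 : Nat) : Int) from rfl, hxorNat, Nat.xor_zero,
        Int.shiftLeft_eq_mul_pow, Int.shiftLeft_eq_mul_pow,
        show Int.xor (3 * 1) ((0 : Nat) : Int) = 3 from by decide]
    push_cast
    ring
  · -- true, true : xor (3*2^n) (2^n)
    rw [h3, hxorNat,
        show (3 * 2 ^ n) ^^^ (2 ^ n) = 2 * 2 ^ n by
          rw [show 3 * 2 ^ n = 3 <<< n from by rw [Nat.shiftLeft_eq],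
              show (2 ^ n : Nat) = 1 <<< n from by rw [Nat.one_shiftLeft],
              hshiftXor, show (3 : Nat) ^^^ 1 = 2 from by decide,
              Nat.shiftLeft_eq, Nat.shiftLeft_eq]
          ring,
        Int.shiftLeft_eq_mul_pow, Int.shiftLeft_eq_mul_pow,
        show Int.xor (3 * 1) 1 = 2 from by decide]
    push_cast
    ring

-- small Bool/pvB facts used in the induction step
theorem pvXorB (b c : Bool) : Int.xor (pvB b) (pvB c) = pvB (xor b c) := by
  cases b <;> cases c <;> decide

-- main invariant: A's rotated coordinates vs B's orientation state
theorem pvLoopEq : ∀ (n : Nat) (X Y x y acc : Int) (sb fb : Bool),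
    (∀ a, a < n → X.testBit a = xor ((if sb then y else x).testBit a) fb) →
    (∀ a, a < n → Y.testBit a = xor ((if sb then x else y).testBit a) fb) →
    pvLoopA n X Y acc = pvLoopB n x y (pvB sb) (pvB fb) acc := by
  intro n
  induction n with
  | zero => intro X Y x y acc sb fb _ _; rfl
  | succ a ih =>
    intro X Y x y acc sb fb hX hY
    have hXa := hX a (Nat.lt_succ_self a)
    have hYa := hY a (Nat.lt_succ_self a)
    have hne : ((2 ^ a : Nat) : Int) ≠ 0 := by positivity
    have hsel1 : (if pvB sb ≠ 0 then pvB (y.testBit a) else pvB (x.testBit a))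
        = pvB ((if sb then y else x).testBit a) := by cases sb <;> simp [pvB]
    have hsel2 : (if pvB sb ≠ 0 then pvB (x.testBit a) else pvB (y.testBit a))
        = pvB ((if sb then x else y).testBit a) := by cases sb <;> simp [pvB]
    simp only [pvLoopA, pvLoopB]
    rw [pvLandPow, pvLandPow, pvLandOne, pvLandOne, hsel1, hsel2, pvXorB, pvXorB,
        ← hXa, ← hYa, pvDigitA]
    generalize acc + (Int.xor (3 * pvB (X.testBit a)) (pvB (Y.testBit a))) <<< (2 * (a : Int)) = acc'
    cases hbX : X.testBit a <;> cases hbY : Y.testBit a <;>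
      simp only [pvRotate, pvB, Bool.false_eq_true, ite_true, ite_false, if_true, if_false]
    · -- bX = false, bY = false: swap, no flip
      rw [if_neg (show ¬ (0 : Int) ≠ 0 from by decide)]
      rw [show Int.xor (if sb then (1:Int) else 0) 1 = if !sb then (1:Int) else 0 from
            by cases sb <;> decide,
          show Int.xor (if fb then (1:Int) else 0) 0 = if fb then (1:Int) else 0 from
            by cases fb <;> decide]
      exact ih Y X x y acc' (!sb) fb
        (fun b hb => by
          rw [show (if !sb then y else x) = (if sb then x else y) from by cases sb <;> rfl]
          exact hY b (Nat.lt_succ_of_lt hb))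
        (fun b hb => by
          rw [show (if !sb then x else y) = (if sb then y else x) from by cases sb <;> rfl]
          exact hX b (Nat.lt_succ_of_lt hb))
    · -- bX = false, bY = true: no rotation, state unchanged
      rw [if_neg hne, if_neg (by decide)]
      exact ih X Y x y acc' sb fb
        (fun b hb => hX b (Nat.lt_succ_of_lt hb))
        (fun b hb => hY b (Nat.lt_succ_of_lt hb))
    · -- bX = true, bY = false: flip and swap
      rw [if_pos hne]
      rw [show Int.xor (if sb then (1:Int) else 0) 1 = if !sb then (1:Int) else 0 from
            by cases sb <;> decide,
          show Int.xor (if fb then (1:Int) else 0) 1 = if !fb then (1:Int) else 0 from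
            by cases fb <;> decide]
      exact ih (1 <<< (a : Int) - 1 - Y) (1 <<< (a : Int) - 1 - X) x y acc' (!sb) (!fb)
        (fun b hb => by
          rw [pvFlipBit hb, hY b (Nat.lt_succ_of_lt hb),
            show (if !sb then y else x) = (if sb then x else y) from by cases sb <;> rfl]
          cases ((if sb then x else y).testBit b) <;> cases fb <;> decide)
        (fun b hb => by
          rw [pvFlipBit hb, hX b (Nat.lt_succ_of_lt hb),
            show (if !sb then x else y) = (if sb then y else x) from by cases sb <;> rfl]
          cases ((if sb then y else x).testBit b) <;> cases fb <;> decide)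
    · -- bX = true, bY = true: no rotation, state unchanged
      rw [if_neg hne, if_neg (by decide)]
      exact ih X Y x y acc' sb fb
        (fun b hb => hX b (Nat.lt_succ_of_lt hb))
        (fun b hb => hY b (Nat.lt_succ_of_lt hb))

-- ===== VERDICT (by name: the statement is the Claim_ definition above) =====
theorem zxy_to_tileid_spec : Claim_equal_zxy_to_tileid := by
  intro z x y _ hpre
  unfold Spec_zxy_to_tileid zxy_to_tileid zxy_to_tileid_alt
  obtain ⟨h0, h31, hx, hy⟩ := hpre
  have hpow : ((1:Int) <<< (z.toNat : Int)) = ((2 ^ z.toNat : Nat) : Int) := Int.one_shiftLeft _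
  have hcast : ((2 ^ z.toNat : Nat) : Int) = (2:Int) ^ z.toNat := by push_cast; ring
  have hg : ¬ (x > (1 <<< (z.toNat : Int)) - 1 ∨ y > (1 <<< (z.toNat : Int)) - 1) := by
    rw [hpow, hcast]; omega
  rw [if_neg (by omega : ¬ z > 31), if_neg (by omega : ¬ z < 0), if_neg hg,
      if_neg (by omega : ¬ z > 31), if_neg (by omega : ¬ z < 0), if_neg hg]
  exact pvLoopEq z.toNat x y x y _ false false (by intro a _; simp) (by intro a _; simp)
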